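-- pv_equiv track=rewrite | github.com/liuzhonghe060718/Introduction-to-computation-B | 动态规划/单调子序列.py | min_testers_needed
-- ===== SOURCE A (Python) =====
-- from bisect import bisect_right
--
-- def min_testers_needed(scores):
--     scores.reverse()  # 反转序列以找到最长下降子序列的长度
--     lis = []  # 用于存储最长上升子序列
--
--     for score in scores:
--         pos = bisect_right(lis, score)  # 找到当前元素应插入的位置
--         if pos < len(lis):
--             lis[pos] = score  # 替换为新的更小的元素
--         else:
--             lis.append(score)  # 如果当前位置没有位置可以替换，添加新元素
--
--     return len(lis)
-- ===== SOURCE B (Python) =====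
-- def min_testers_needed(scores):
--     scores.reverse()  # same in-place mutation as A
--     dp = []  # (value, length of longest non-decreasing subsequence ending at that value)
--     for x in scores:
--         best = 0
--         for v, l in dp:
--             if v <= x and l > best:
--                 best = l
--         dp.append((x, best + 1))
--     ans = 0
--     for _, l in dp:
--         if l > ans:
--             ans = l
--     return ans
-- ===== Notes on version B (the rewrite author's own statement) =====
-- stated objective: alternative
-- what changed: Replaces the patience-sorting tails array maintained with bisect_right by a quadratic dynamic program that stores, for every element, the length of the longest non-decreasing subsequence ending there, and returns the maximum.
import Mathlib
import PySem

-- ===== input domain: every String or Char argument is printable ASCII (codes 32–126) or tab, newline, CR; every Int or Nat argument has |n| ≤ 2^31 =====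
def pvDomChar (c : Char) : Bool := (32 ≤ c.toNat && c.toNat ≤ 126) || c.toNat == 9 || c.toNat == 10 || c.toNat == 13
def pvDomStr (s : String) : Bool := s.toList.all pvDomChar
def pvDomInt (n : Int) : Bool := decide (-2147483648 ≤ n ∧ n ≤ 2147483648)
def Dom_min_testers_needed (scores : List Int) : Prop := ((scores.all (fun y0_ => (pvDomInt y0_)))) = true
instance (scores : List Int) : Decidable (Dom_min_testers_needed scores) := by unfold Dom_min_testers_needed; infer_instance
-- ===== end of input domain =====

-- B replaces A's patience-sorting tails array (bisect_right) by a quadratic DP over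
-- (value, best-length-ending-here) pairs; equal return value everywhere (objective: alternative).
-- Both A and B reverse `scores` in place in Python; the equivalence proved here is about the return value.

-- ===== PORT A =====
-- bisect_right on a SORTED list returns the number of elements ≤ x; `lis` is sorted
-- throughout A's loop (proved below, lemma `step_inv`), so this port is exact for A.
def pyBisectRight (l : List Int) (x : Int) : Nat := l.countP (fun a => a ≤ x)

def aStep (lis : List Int) (score : Int) : List Int :=
  let pos := pyBisectRight lis score
  if pos < lis.length then lis.set pos score else lis ++ [score]

def min_testers_needed (scores : List Int) : Int :=
  ((scores.reverse.foldl aStep []).length : Int)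

-- ===== PORT B =====
-- inner loop of Source B: best = max dp-length among pairs with value ≤ x (0 if none)
def bBest (dp : List (Int × Int)) (x : Int) : Int :=
  dp.foldl (fun b p => if p.1 ≤ x ∧ p.2 > b then p.2 else b) 0

def bStep (dp : List (Int × Int)) (x : Int) : List (Int × Int) :=
  dp ++ [(x, bBest dp x + 1)]

def min_testers_needed_alt (scores : List Int) : Int :=
  (scores.reverse.foldl bStep []).foldl (fun m p => if p.2 > m then p.2 else m) 0

-- ===== PRECONDITION & SPEC =====
def Spec_min_testers_needed (scores : List Int) (out : Int) : Prop := out = min_testers_needed_alt scores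
instance (scores : List Int) (out : Int) : Decidable (Spec_min_testers_needed scores out) := by unfold Spec_min_testers_needed; infer_instance

-- ===== CLAIM (what is proved, stated in full; the proofs are below) =====
def Claim_equal_min_testers_needed : Prop := ∀ (scores : List Int), Dom_min_testers_needed scores → Spec_min_testers_needed scores (min_testers_needed scores)

-- ===== LEMMAS AND PROOFS =====

-- recursive characterisations of B's two folds
def maxle : List (Int × Int) → Int → Int
  | [], _ => 0
  | (v, l) :: t, x => max (if v ≤ x then l else 0) (maxle t x)

def maxl : List (Int × Int) → Int
  | [] => 0
  | (_, l) :: t => max l (maxl t)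

lemma maxle_nonneg (dp : List (Int × Int)) (x : Int) : 0 ≤ maxle dp x := by
  induction dp with
  | nil => simp [maxle]
  | cons p t ih => obtain ⟨v, l⟩ := p; simp [maxle]; right; exact ih

lemma maxl_nonneg (dp : List (Int × Int)) : 0 ≤ maxl dp := by
  induction dp with
  | nil => simp [maxl]
  | cons p t ih => obtain ⟨v, l⟩ := p; simp [maxl]; right; exact ih

lemma bBest_foldl (dp : List (Int × Int)) (x b : Int) (hb : 0 ≤ b) :
    dp.foldl (fun b p => if p.1 ≤ x ∧ p.2 > b then p.2 else b) b = max b (maxle dp x) := by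
  induction dp generalizing b with
  | nil => simp [maxle]; omega
  | cons p t ih =>
    obtain ⟨v, l⟩ := p
    simp only [List.foldl_cons, maxle]
    have h1 : (if v ≤ x ∧ l > b then l else b) = max b (if v ≤ x then l else 0) := by
      split_ifs <;> omega
    rw [h1, ih _ (by omega)]
    omega

lemma bBest_eq (dp : List (Int × Int)) (x : Int) : bBest dp x = maxle dp x := by
  rw [bBest, bBest_foldl dp x 0 le_rfl]
  have := maxle_nonneg dp x; omega

lemma maxl_foldl (dp : List (Int × Int)) (b : Int) (hb : 0 ≤ b) :
    dp.foldl (fun m p => if p.2 > m then p.2 else m) b = max b (maxl dp) := by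
  induction dp generalizing b with
  | nil => simp [maxl]; omega
  | cons p t ih =>
    obtain ⟨v, l⟩ := p
    simp only [List.foldl_cons, maxl]
    have h1 : (if l > b then l else b) = max b l := by split_ifs <;> omega
    rw [h1, ih _ (by omega)]
    omega

lemma maxle_append (dp : List (Int × Int)) (v l x : Int) :
    maxle (dp ++ [(v, l)]) x = max (maxle dp x) (if v ≤ x then l else 0) := by
  induction dp with
  | nil => simp [maxle]; omega
  | cons p t ih => obtain ⟨w, m⟩ := p; simp [maxle, ih]

lemma maxl_append (dp : List (Int × Int)) (v l : Int) :
    maxl (dp ++ [(v, l)]) = max (maxl dp) l := by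
  induction dp with
  | nil => simp [maxl]; omega
  | cons p t ih => obtain ⟨w, m⟩ := p; simp [maxl, ih]

-- number of elements ≤ y
def cnt (l : List Int) (y : Int) : Nat := l.countP (fun a => a ≤ y)

-- in a sorted list, the elements ≤ x are exactly the first `cnt l x` ones
lemma count_split (l : List Int) (hl : l.Sorted (· ≤ ·)) (x : Int) :
    (∀ a ∈ l.take (cnt l x), a ≤ x) ∧ (∀ a ∈ l.drop (cnt l x), x < a) := by
  induction l with
  | nil => simp
  | cons h t ih =>
    rw [List.sorted_cons] at hl
    obtain ⟨hh, ht⟩ := hl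
    by_cases hx : h ≤ x
    · have : cnt (h :: t) x = cnt t x + 1 := by simp [cnt, List.countP_cons, hx]
      rw [this]
      obtain ⟨h1, h2⟩ := ih ht
      constructor
      · intro a ha
        simp only [List.take_succ_cons, List.mem_cons] at ha
        rcases ha with rfl | ha
        · exact hx
        · exact h1 a ha
      · intro a ha
        simpa using h2 a (by simpa using ha)
    · have hzero : cnt t x = 0 := by
        rw [cnt, List.countP_eq_zero]
        intro a ha
        simp only [decide_eq_true_eq]
        intro hax
        exact hx (le_trans (hh a ha) hax)
      have : cnt (h :: t) x = 0 := by
        simp only [cnt] at hzero ⊢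
        simp [List.countP_cons, hx, hzero]
      rw [this]
      constructor
      · simp
      · intro a ha
        simp only [List.drop_zero, List.mem_cons] at ha
        rcases ha with rfl | ha
        · omega
        · exact lt_of_lt_of_le (by omega) (hh a ha)

-- the invariant relating A's tails array to B's DP table
def LoopInv (lis : List Int) (dp : List (Int × Int)) : Prop :=
  lis.Sorted (· ≤ ·) ∧ (∀ y, maxle dp y = (cnt lis y : Int)) ∧ maxl dp = (lis.length : Int)

lemma step_inv (lis : List Int) (dp : List (Int × Int)) (x : Int) (h : LoopInv lis dp) :
    LoopInv (aStep lis x) (bStep dp x) := by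
  obtain ⟨hs, hc, hm⟩ := h
  have hposle : cnt lis x ≤ lis.length := List.countP_le_length
  have hbest : bBest dp x = (cnt lis x : Int) := by rw [bBest_eq, hc]
  have hpb : pyBisectRight lis x = cnt lis x := rfl
  obtain ⟨hTake, hDrop⟩ := count_split lis hs x
  by_cases hcase : cnt lis x < lis.length
  · -- set case
    set pos := cnt lis x with hpos
    have hget : x < lis[pos] := hDrop _ (by
      rw [List.drop_eq_getElem_cons hcase]; exact List.mem_cons_self)
    have hdropmem : ∀ a ∈ lis.drop (pos + 1), x < a := by
      intro a ha
      exact hDrop a (by rw [List.drop_eq_getElem_cons hcase]; exact List.mem_cons_of_mem _ ha)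
    have hgetdrop : ∀ a ∈ lis.drop (pos + 1), lis[pos] ≤ a := by
      have hds : (lis.drop pos).Sorted (· ≤ ·) := hs.sublist (lis.drop_sublist pos)
      rw [List.drop_eq_getElem_cons hcase, List.sorted_cons] at hds
      exact hds.1
    have hset : aStep lis x = lis.take pos ++ x :: lis.drop (pos + 1) := by
      simp only [aStep]
      rw [hpb, if_pos hcase, List.set_eq_take_append_cons_drop, if_pos hcase]
    have hdecomp : lis = lis.take pos ++ lis[pos] :: lis.drop (pos + 1) := by
      conv_lhs => rw [← List.take_append_drop pos lis, List.drop_eq_getElem_cons hcase]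
    have htklen : (lis.take pos).length = pos := by
      rw [List.length_take]; omega
    refine ⟨?_, ?_, ?_⟩
    · -- sortedness
      rw [hset, List.Sorted, List.pairwise_append]
      refine ⟨hs.sublist (lis.take_sublist pos), ?_, ?_⟩
      · rw [List.pairwise_cons]
        exact ⟨fun a ha => le_of_lt (hdropmem a ha), hs.sublist (lis.drop_sublist (pos + 1))⟩
      · intro a ha b hb
        have hax : a ≤ x := hTake a ha
        rcases List.mem_cons.mp hb with rfl | hb
        · exact hax
        · exact le_of_lt (lt_of_le_of_lt hax (hdropmem b hb))
    · -- counting invariant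
      intro y
      rw [bStep, maxle_append, hbest, hc y, hset]
      have hcnty : cnt lis y =
          cnt (lis.take pos) y + (if lis[pos] ≤ y then 1 else 0) + cnt (lis.drop (pos + 1)) y := by
        conv_lhs => rw [hdecomp]
        simp only [cnt, List.countP_append, List.countP_cons, decide_eq_true_eq]
        split_ifs <;> omega
      have hcnty' : cnt (lis.take pos ++ x :: lis.drop (pos + 1)) y =
          cnt (lis.take pos) y + (if x ≤ y then 1 else 0) + cnt (lis.drop (pos + 1)) y := by
        simp only [cnt, List.countP_append, List.countP_cons, decide_eq_true_eq]
        split_ifs <;> omega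
      by_cases hxy : x ≤ y
      · have hc1 : cnt (lis.take pos) y = pos := by
          rw [cnt, List.countP_eq_length.mpr, htklen]
          intro a ha
          simpa using le_trans (hTake a ha) hxy
        by_cases hgy : lis[pos] ≤ y
        · rw [hcnty', hc1]
          rw [hcnty, hc1]
          simp only [if_pos hxy, if_pos hgy]
          push_cast
          omega
        · have hc2 : cnt (lis.drop (pos + 1)) y = 0 := by
            rw [cnt, List.countP_eq_zero]
            intro a ha
            simpa using lt_of_lt_of_le (by omega : y < lis[pos]) (hgetdrop a ha)
          rw [hcnty', hc1, hc2, hcnty, hc1, hc2]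
          simp only [if_pos hxy, if_neg hgy]
          push_cast
          omega
      · have hgy : ¬ lis[pos] ≤ y := by omega
        rw [hcnty', hcnty]
        simp only [if_neg hxy, if_neg hgy]
        push_cast
        omega
    · -- max length
      rw [bStep, maxl_append, hbest, hm, hset]
      have hlen : (lis.take pos ++ x :: lis.drop (pos + 1)).length = lis.length := by
        simp [htklen]; omega
      rw [hlen]
      push_cast
      omega
  · -- append case
    have hposeq : cnt lis x = lis.length := by omega
    have hall : ∀ a ∈ lis, a ≤ x := by
      intro a ha
      exact hTake a (by rwa [hposeq, List.take_length])
    have happ : aStep lis x = lis ++ [x] := by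
      simp only [aStep]
      rw [hpb, if_neg (by omega)]
    refine ⟨?_, ?_, ?_⟩
    · rw [happ, List.Sorted, List.pairwise_append]
      refine ⟨hs, List.pairwise_singleton _ _, ?_⟩
      intro a ha b hb
      simp only [List.mem_singleton] at hb
      subst hb
      exact hall a ha
    · intro y
      rw [bStep, maxle_append, hbest, hc y, happ]
      have hcnta : cnt (lis ++ [x]) y = cnt lis y + (if x ≤ y then 1 else 0) := by
        simp only [cnt, List.countP_append, List.countP_cons, List.countP_nil,
          decide_eq_true_eq]
        split_ifs <;> omega
      rw [hcnta]
      by_cases hxy : x ≤ y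
      · have hcy : cnt lis y = lis.length := by
          rw [cnt, List.countP_eq_length.mpr]
          intro a ha
          simpa using le_trans (hall a ha) hxy
        simp only [if_pos hxy]
        rw [hcy, hposeq]
        push_cast
        omega
      · simp only [if_neg hxy]
        push_cast
        omega
    · rw [bStep, maxl_append, hbest, hm, happ]
      simp only [List.length_append, List.length_cons, List.length_nil]
      rw [hposeq]
      push_cast
      omega

lemma fold_inv (l : List Int) (lis : List Int) (dp : List (Int × Int)) (h : LoopInv lis dp) :
    LoopInv (l.foldl aStep lis) (l.foldl bStep dp) := by
  induction l generalizing lis dp with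
  | nil => exact h
  | cons x t ih => exact ih _ _ (step_inv lis dp x h)

-- ===== VERDICT (by name: the statement is the Claim_ definition above) =====
theorem min_testers_needed_spec : Claim_equal_min_testers_needed := by
  intro scores _
  unfold Spec_min_testers_needed min_testers_needed min_testers_needed_alt
  have h0 : LoopInv [] [] :=
    ⟨List.Pairwise.nil, fun y => by simp [maxle, cnt], by simp [maxl]⟩
  obtain ⟨_, _, hm⟩ := fold_inv scores.reverse [] [] h0
  rw [maxl_foldl _ 0 le_rfl, ← hm]
  have := maxl_nonneg (scores.reverse.foldl bStep [])
  omega
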